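-- pv_equiv track=rewrite | github.com/hi-sharma/awesome-data-structure | binary_search/binary_search.py | search_or_insert_index
-- ===== SOURCE A (Python) =====
-- def search_or_insert_index(arr, target):
--   left = 0
--   right = len(arr) - 1
--   while left <= right:
--     mid = (left + right)//2
--     if arr[mid] == target:
--       return mid
--     elif arr[mid] < target:
--       left = mid + 1
--     else:
--       right = mid - 1
--   return left
-- ===== SOURCE B (Python) =====
-- def search_or_insert_index(arr, target):
--   def go(sub, off):
--     if not sub:
--       return off
--     m = (len(sub) - 1) // 2
--     v = sub[m]
--     if v == target:
--       return off + m
--     if v < target: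
--       return go(sub[m + 1:], off + m + 1)
--     return go(sub[:m], off)
--   return go(arr, 0)
-- ===== Notes on version B (the rewrite author's own statement) =====
-- stated objective: alternative
-- what changed: Replaces the iterative two-pointer loop over indices with a recursive divide-and-conquer on array slices carrying an offset, preserving the exact midpoint and comparison order.
import Mathlib
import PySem

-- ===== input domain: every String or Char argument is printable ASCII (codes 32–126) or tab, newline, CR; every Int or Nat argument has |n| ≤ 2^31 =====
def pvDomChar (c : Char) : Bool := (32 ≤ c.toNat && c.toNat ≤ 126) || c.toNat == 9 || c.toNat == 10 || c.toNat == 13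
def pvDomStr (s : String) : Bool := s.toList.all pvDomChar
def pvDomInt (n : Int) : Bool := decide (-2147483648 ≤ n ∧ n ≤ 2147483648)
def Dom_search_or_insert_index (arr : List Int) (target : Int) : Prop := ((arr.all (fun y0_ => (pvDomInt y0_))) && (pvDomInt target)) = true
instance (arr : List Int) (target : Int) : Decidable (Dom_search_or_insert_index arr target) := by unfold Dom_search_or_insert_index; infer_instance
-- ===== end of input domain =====

-- B replaces A's iterative two-pointer loop by a recursive divide-and-conquer on slices with
-- an offset (same midpoint and comparison order); objective: alternative decomposition.

-- ===== PORT A =====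
-- A's while-loop over the mutable pair (left, right); arr[mid] is always in range
-- (0 ≤ left ≤ mid ≤ right < len whenever the body runs), so A never raises.
def aLoop (arr : List Int) (target left right : Int) : Int :=
  if _h : left ≤ right then
    let mid := PySem.Int.floordiv (left + right) 2
    let v := PySem.List.pyGetD arr mid 0
    if v = target then mid
    else if v < target then aLoop arr target (mid + 1) right
    else aLoop arr target left (mid - 1)
  else left
termination_by (right + 1 - left).toNat
decreasing_by
  all_goals
    have hb := PySem.Int.floordiv_two_mid_bounds (lo := left) (hi := right) _h
    omega

def search_or_insert_index (arr : List Int) (target : Int) : Int :=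
  aLoop arr target 0 ((arr.length : Int) - 1)

-- ===== PORT B =====
-- go(sub, off): recursion on the current slice with its global offset.
def goAlt (target : Int) (sub : List Int) (off : Int) : Int :=
  if hs : sub = [] then off
  else
    let m := PySem.Int.floordiv ((sub.length : Int) - 1) 2
    let v := PySem.List.pyGetD sub m 0
    if v = target then off + m
    else if v < target then goAlt target (PySem.List.slice sub (some (m + 1)) none) (off + m + 1)
    else goAlt target (PySem.List.slice sub none (some m)) off
termination_by sub.length
decreasing_by
  all_goals
    have hlen : 1 ≤ (sub.length : Int) := by
      have : sub.length ≠ 0 := fun h => hs (List.eq_nil_of_length_eq_zero h); omega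
    have hm0 : (0:Int) ≤ PySem.Int.floordiv ((sub.length : Int) - 1) 2 := by
      rw [PySem.Int.floordiv_eq_ediv_of_pos (by norm_num)]; omega
    have hm1 : PySem.Int.floordiv ((sub.length : Int) - 1) 2 < (sub.length : Int) := by
      rw [PySem.Int.floordiv_eq_ediv_of_pos (by norm_num)]; omega
  · have hA : (0:Int) ≤ PySem.Int.floordiv ((sub.length : Int) - 1) 2 + 1 := by omega
    rw [PySem.List.slice_from sub hA]
    simp only [List.length_drop]; omega
  · rw [PySem.List.slice_to sub hm0]
    simp only [List.length_take]; omega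

def search_or_insert_index_alt (arr : List Int) (target : Int) : Int :=
  goAlt target arr 0

-- ===== PRECONDITION & SPEC =====
def Spec_search_or_insert_index (arr : List Int) (target : Int) (out : Int) : Prop := out = search_or_insert_index_alt arr target
instance (arr : List Int) (target : Int) (out : Int) : Decidable (Spec_search_or_insert_index arr target out) := by unfold Spec_search_or_insert_index; infer_instance

-- ===== CLAIM (what is proved, stated in full; the proofs are below) =====
def Claim_equal_search_or_insert_index : Prop := ∀ (arr : List Int) (target : Int), Dom_search_or_insert_index arr target → Spec_search_or_insert_index arr target (search_or_insert_index arr target)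

-- ===== LEMMAS AND PROOFS =====

-- Loop ↔ recursion: with invariant 0 ≤ left ≤ right+1 and right < len, A's loop from (left,right)
-- computes what B's go computes on the slice arr[left:right+1] with offset left.
theorem aLoop_eq_goAlt (arr : List Int) (target : Int) :
    ∀ (k : Nat) (left right : Int), (right + 1 - left).toNat = k →
    0 ≤ left → left ≤ right + 1 → right < (arr.length : Int) →
    aLoop arr target left right =
      goAlt target ((arr.drop left.toNat).take (right + 1 - left).toNat) left := by
  intro k
  induction k using Nat.strong_induction_on with
  | _ k ih =>
    intro left right hk h0 h1 h2
    rw [aLoop]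
    by_cases hlr : left ≤ right
    · rw [dif_pos hlr]
      set K := (right + 1 - left).toNat with hK
      set sub := (arr.drop left.toNat).take K with hsub
      have hslen : sub.length = K := by
        simp only [hsub, List.length_take, List.length_drop]; omega
      have hne : sub ≠ [] := by
        intro h; rw [h] at hslen; simp at hslen; omega
      rw [goAlt, dif_neg hne]
      have hfd2 : ∀ a : Int, PySem.Int.floordiv a 2 = a / 2 := fun a =>
        PySem.Int.floordiv_eq_ediv_of_pos (by norm_num)
      have hc : ((sub.length : Int)) = right + 1 - left := by rw [hslen]; omega
      set m : Int := PySem.Int.floordiv ((sub.length : Int) - 1) 2 with hm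
      set mid : Int := PySem.Int.floordiv (left + right) 2 with hmid
      have hmids : mid = left + m := by rw [hm, hmid, hfd2, hfd2, hc]; omega
      have hm0 : 0 ≤ m := by rw [hm, hfd2, hc]; omega
      have hmlt : m < (sub.length : Int) := by rw [hm, hfd2]; omega
      have hmidlt : mid < (arr.length : Int) := by omega
      have hv : PySem.List.pyGetD sub m 0 = PySem.List.pyGetD arr mid 0 := by
        rw [PySem.List.pyGetD_eq_getElem sub 0 hm0 hmlt,
            PySem.List.pyGetD_eq_getElem arr 0 (by omega) hmidlt]
        have ht : mid.toNat = left.toNat + m.toNat := by omega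
        have hmK : m.toNat < K := by omega
        simp only [hsub, List.getElem_take, List.getElem_drop, ht]
      simp only [hv]
      by_cases he : PySem.List.pyGetD arr mid 0 = target
      · rw [if_pos he, if_pos he]; omega
      · rw [if_neg he, if_neg he]
        by_cases hl : PySem.List.pyGetD arr mid 0 < target
        · rw [if_pos hl, if_pos hl]
          have hA : (0:Int) ≤ m + 1 := by omega
          rw [PySem.List.slice_from sub hA]
          have ihs := ih (right + 1 - (mid + 1)).toNat (by omega) (mid + 1) right rfl
            (by omega) (by omega) h2
          rw [ihs]
          have e1 : (right + 1 - (mid + 1)).toNat = K - (m + 1).toNat := by omega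
          have e2 : (mid + 1).toNat = left.toNat + (m + 1).toNat := by omega
          have e3 : mid + 1 = left + m + 1 := by omega
          rw [hsub, List.drop_take, List.drop_drop, e1, e2, e3]
        · rw [if_neg hl, if_neg hl]
          rw [PySem.List.slice_to sub hm0]
          have ihs := ih ((mid - 1) + 1 - left).toNat (by omega) left (mid - 1) rfl
            h0 (by omega) (by omega)
          rw [ihs]
          have e4 : ((mid - 1) + 1 - left).toNat = min m.toNat K := by omega
          rw [hsub, List.take_take, e4]
    · rw [dif_neg hlr]
      have hz : (right + 1 - left).toNat = 0 := by omega
      rw [hz]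
      simp only [List.take_zero]
      rw [goAlt, dif_pos rfl]

theorem search_or_insert_index_spec : Claim_equal_search_or_insert_index := by
  intro arr target _
  unfold Spec_search_or_insert_index search_or_insert_index search_or_insert_index_alt
  have h := aLoop_eq_goAlt arr target (arr.length) 0 ((arr.length : Int) - 1)
    (by omega) (by omega) (by omega) (by omega)
  simpa using h
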